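-- pv_equiv track=rewrite | github.com/facste95/PythonUtility | Crush-o-Meter/crushometer.py | sumRecursive
-- ===== SOURCE A (Python) =====
-- def splitList(list1):
--     out = []
--     for elem in list1:
--         for c in str(elem):
--             out.append(int(c))
--     return out
--
-- def sumRecursive(occurs):
--     if len(occurs) <= 2:
--         return occurs
--
--     new_occurs = []
--     is_even = len(occurs)%2 == 0
--     for i in range(0, len(occurs)):
--         if i < (len(occurs)-(i+1)):
--             new_occurs.append(occurs[i] + occurs[-(i+1)])
--         else:
--             break
--     if not is_even:
--         new_occurs.append(occurs[i])
--     return sumRecursive(splitList(new_occurs))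
-- ===== SOURCE B (Python) =====
-- def sumRecursive(occurs):
--     # Iterative rewrite: pair first half with reversed list via zip, digit-split with a comprehension.
--     while len(occurs) > 2:
--         n = len(occurs)
--         paired = [x + y for x, y in zip(occurs[:n // 2], reversed(occurs))]
--         if n % 2:
--             paired.append(occurs[n // 2])
--         occurs = [int(d) for x in paired for d in str(x)]
--     return occurs
-- ===== Notes on version B (the rewrite author's own statement) =====
-- stated objective: simpler
-- what changed: Replaces A's recursion with an explicit break-terminated index loop and a separate two-level append helper by a single while loop whose body pairs the first half with the reversed list via zip and digit-splits with one comprehension.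
import Mathlib
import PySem

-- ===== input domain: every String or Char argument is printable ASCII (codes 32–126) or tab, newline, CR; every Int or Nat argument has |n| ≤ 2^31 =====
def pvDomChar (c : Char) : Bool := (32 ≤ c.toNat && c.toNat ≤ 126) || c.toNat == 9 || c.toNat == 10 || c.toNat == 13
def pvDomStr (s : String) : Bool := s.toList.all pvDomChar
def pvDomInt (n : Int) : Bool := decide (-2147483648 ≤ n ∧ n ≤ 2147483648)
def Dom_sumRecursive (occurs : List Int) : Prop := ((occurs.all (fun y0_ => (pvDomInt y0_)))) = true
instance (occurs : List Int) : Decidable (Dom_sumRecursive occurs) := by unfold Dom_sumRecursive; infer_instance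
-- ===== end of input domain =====

-- B replaces A's recursion-with-break by an iterative while loop that pairs the first half
-- with the reversed list via zip and digit-splits with a comprehension (objective: simpler).


-- ===== PORT A =====
-- splitList: out = []; for elem in list1: for c in str(elem): out.append(int(c)).
-- int(c) on a non-digit char ('-') is a ValueError (PySem.Int.ofStr? = none); Pre_ excludes
-- exactly the inputs reaching it, so .getD 0 is never taken on admitted inputs.
def splitList (list1 : List Int) : List Int :=
  list1.foldl (fun out elem =>
    (PySem.Int.toStr elem).toList.foldl
      (fun out c => out ++ [(PySem.Int.ofStr? (String.ofList [c])).getD 0]) out) []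

-- The recursion, with fuel only to make it total in Lean (the guard changes no admitted
-- computation: the Python recursion depth is far below the supplied fuel, see sumRecursive).
-- Python's for-loop appends occurs[i] + occurs[-(i+1)] for i = 0 .. n/2 - 1 and then breaks
-- (at i = n/2 the guard i < n-(i+1) first fails); if n is odd the loop variable i is then
-- n/2 and occurs[i] — the middle element — is appended.
def sumRecursiveFuel : Nat → List Int → List Int
  | 0, occurs => occurs
  | fuel+1, occurs =>
    if occurs.length ≤ 2 then occurs
    else
      let n := occurs.length
      let new_occurs := (List.range (n / 2)).map (fun (i : Nat) =>
        PySem.List.pyGetD occurs (i : Int) 0 + PySem.List.pyGetD occurs (-((i : Int) + 1)) 0)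
      let new_occurs := if n % 2 == 0 then new_occurs
        else new_occurs ++ [PySem.List.pyGetD occurs ((n / 2 : Nat) : Int) 0]
      sumRecursiveFuel fuel (splitList new_occurs)

-- 128*(n+1) steps always suffice: after one step every element is a digit 0..9, and from a
-- digit list the measure (sum, length) strictly decreases lexicographically each step.
def sumRecursive (occurs : List Int) : List Int :=
  sumRecursiveFuel (128 * (occurs.length + 1)) occurs

-- ===== PORT B =====
-- [int(d) for x in paired for d in str(x)]
def pvDigits (x : Int) : List Int :=
  (PySem.Int.toChars x).map (fun d => (PySem.Int.ofChars? [d]).getD 0)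

-- one iteration of B's while-loop body
def pvStepB (occurs : List Int) : List Int :=
  let n := occurs.length
  let paired := ((PySem.List.slice occurs none (some ((n / 2 : Nat) : Int))).zip
      occurs.reverse).map (fun p => p.1 + p.2)
  let paired := if n % 2 == 0 then paired
    else paired ++ [PySem.List.pyGetD occurs ((n / 2 : Nat) : Int) 0]
  paired.flatMap pvDigits

-- the while loop, with the same fuel guard as port A
def pvLoopB : Nat → List Int → List Int
  | 0, occurs => occurs
  | fuel+1, occurs => if 2 < occurs.length then pvLoopB fuel (pvStepB occurs) else occurs

def sumRecursive_alt (occurs : List Int) : List Int :=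
  pvLoopB (128 * (occurs.length + 1)) occurs

-- ===== PRECONDITION & SPEC =====
-- Pre_ excludes exactly the inputs on which Python A raises ValueError: length > 2 and some
-- pair sum (or the odd middle element) negative, so splitList reaches int('-').
def Pre_sumRecursive (occurs : List Int) : Prop :=
  occurs.length ≤ 2 ∨
    ((∀ i < occurs.length / 2, 0 ≤ occurs.getD i 0 + occurs.getD (occurs.length - 1 - i) 0) ∧
     (occurs.length % 2 = 1 → 0 ≤ occurs.getD (occurs.length / 2) 0))
instance (occurs : List Int) : Decidable (Pre_sumRecursive occurs) := by
  unfold Pre_sumRecursive; infer_instance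

def pvWitness_sumRecursive : List Int := [9, 4, 7, 1, 5]

def Spec_sumRecursive (occurs : List Int) (out : List Int) : Prop := out = sumRecursive_alt occurs
instance (occurs : List Int) (out : List Int) : Decidable (Spec_sumRecursive occurs out) := by unfold Spec_sumRecursive; infer_instance

-- ===== CLAIM (what is proved, stated in full; the proofs are below) =====
def Claim_equal_sumRecursive : Prop := ∀ (occurs : List Int), Dom_sumRecursive occurs → Pre_sumRecursive occurs → Spec_sumRecursive occurs (sumRecursive occurs)

-- ===== LEMMAS AND PROOFS =====

-- one element's inner char loop, via PySem.List.foldl_append_singleton_eq_map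
theorem splitList_inner (x : Int) (out : List Int) :
    (PySem.Int.toStr x).toList.foldl
      (fun out c => out ++ [(PySem.Int.ofStr? (String.ofList [c])).getD 0]) out
    = out ++ pvDigits x := by
  rw [PySem.List.foldl_append_singleton_eq_map]
  simp [pvDigits, PySem.Int.toList_toStr, PySem.Int.ofStr?]

-- the outer loop over elements, appending each element's digit block
theorem foldl_digits (l : List Int) : ∀ out : List Int,
    l.foldl (fun out e => out ++ pvDigits e) out = out ++ l.flatMap pvDigits := by
  induction l with
  | nil => simp
  | cons x xs ih => intro out; simp [ih, List.append_assoc]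

-- A's hand-written double append-loop is the flatMap of B's per-element digit list.
theorem splitList_eq_flatMap (l : List Int) : splitList l = l.flatMap pvDigits := by
  have h : (fun (out : List Int) (elem : Int) =>
      (PySem.Int.toStr elem).toList.foldl
        (fun out c => out ++ [(PySem.Int.ofStr? (String.ofList [c])).getD 0]) out)
      = fun out elem => out ++ pvDigits elem := by
    funext out elem; exact splitList_inner elem out
  unfold splitList
  rw [h, foldl_digits]
  simp

-- A's range-indexed pair list equals B's zip-of-take-with-reverse pair list.
theorem pairs_eq (occurs : List Int) :
    ((PySem.List.slice occurs none (some ((occurs.length / 2 : Nat) : Int))).zip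
        occurs.reverse).map (fun p => p.1 + p.2)
    = (List.range (occurs.length / 2)).map (fun (i : Nat) =>
        PySem.List.pyGetD occurs (i : Int) 0 + PySem.List.pyGetD occurs (-((i : Int) + 1)) 0) := by
  rw [PySem.List.slice_to_natCast]
  apply List.ext_getElem
  · simp; omega
  · intro i h1 h2
    have hi : i < occurs.length / 2 := by simpa using h2
    have hin : i < occurs.length := by omega
    have hneg : (-((i : Int) + 1)) = -(((i + 1 : Nat) : Int)) := by push_cast; ring
    simp only [List.getElem_map, List.getElem_zip, List.getElem_take, List.getElem_reverse,
      List.getElem_range, hneg]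
    rw [PySem.List.pyGetD_neg_natCast occurs (i + 1) 0 (by omega) (by omega), PySem.List.pyGetD_natCast,
      List.getD_eq_getElem _ _ hin]
    have h3 : occurs.length - 1 - i = occurs.length - (i + 1) := by omega
    simp [h3]

-- A's range-indexed pair list equals B's zip-of-take-with-reverse pair list, plus the middle.
theorem step_eq (occurs : List Int) :
    splitList
      ((if occurs.length % 2 == 0 then
          (List.range (occurs.length / 2)).map (fun (i : Nat) =>
            PySem.List.pyGetD occurs (i : Int) 0 + PySem.List.pyGetD occurs (-((i : Int) + 1)) 0)
        else
          (List.range (occurs.length / 2)).map (fun (i : Nat) =>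
            PySem.List.pyGetD occurs (i : Int) 0 + PySem.List.pyGetD occurs (-((i : Int) + 1)) 0)
            ++ [PySem.List.pyGetD occurs ((occurs.length / 2 : Nat) : Int) 0])) =
    pvStepB occurs := by
  rw [splitList_eq_flatMap]
  unfold pvStepB
  simp only [pairs_eq occurs]

theorem fuel_eq (fuel : Nat) : ∀ occurs : List Int,
    sumRecursiveFuel fuel occurs = pvLoopB fuel occurs := by
  induction fuel with
  | zero => intro occurs; rfl
  | succ f ih =>
    intro occurs
    by_cases h : occurs.length ≤ 2
    · simp [sumRecursiveFuel, pvLoopB, h, Nat.not_lt.mpr h]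
    · have h2 : 2 < occurs.length := Nat.not_le.mp h
      simp only [sumRecursiveFuel, pvLoopB, if_neg h, if_pos h2]
      rw [step_eq occurs, ih]

-- ===== VERDICT (by name: the statement is the Claim_ definition above) =====
theorem sumRecursive_spec : Claim_equal_sumRecursive := by
  intro occurs _ _
  unfold Spec_sumRecursive sumRecursive sumRecursive_alt
  exact fuel_eq _ occurs
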